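-- pv_equiv track=rewrite | github.com/TanShets/TanShets | exp1.py | cost2
-- ===== SOURCE A (Python) =====
-- def cost2(a):
--     large = len(a) - 1
--     i = 0
--     sum2 = 0
--     while large > 2:
--         if i % 2 == 0:
--             sum2 += a[0] + a[1]
--         else:
--             sum2 += a[large] + a[1]
--             large -= 2
--         i += 1
--     if large == 1:
--         sum2 += a[1]
--     elif large == 2:
--         sum2 += a[0] + a[1] + a[2]
--     return sum2
-- ===== SOURCE B (Python) =====
-- def cost2(a):
--     n = len(a)
--     if n < 2:
--         return 0
--     strided = [a[i] for i in range(3 + n % 2, n, 2)]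
--     base = sum(strided) + len(strided) * (a[0] + 2 * a[1])
--     if n % 2 == 0:
--         return base + a[1]
--     return base + a[0] + a[1] + a[2]
-- ===== Notes on version B (the rewrite author's own statement) =====
-- stated objective: alternative
-- what changed: A's stateful alternating-parity while loop is replaced by a loop-free closed form: a comprehension over an ascending stride-2 range gathers the strided elements, sum()/len() give the strided total and the multiplier of the constant term len*(a[0]+2*a[1]), and the parity of len(a) selects the tail.
import Mathlib
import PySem

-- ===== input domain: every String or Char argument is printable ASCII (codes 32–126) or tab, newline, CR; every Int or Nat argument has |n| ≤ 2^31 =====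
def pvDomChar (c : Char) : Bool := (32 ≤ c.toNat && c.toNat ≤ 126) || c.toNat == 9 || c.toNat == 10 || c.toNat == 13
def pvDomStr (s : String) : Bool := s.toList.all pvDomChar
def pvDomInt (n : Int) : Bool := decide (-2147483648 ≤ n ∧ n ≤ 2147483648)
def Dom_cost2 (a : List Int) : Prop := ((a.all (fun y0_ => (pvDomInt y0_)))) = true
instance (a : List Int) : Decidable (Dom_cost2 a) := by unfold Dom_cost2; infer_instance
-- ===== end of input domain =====

-- B replaces A's alternating-parity while loop by a loop-free closed form (comprehension over a
-- stride-2 range, sum, and a count-times-constant product); return values proved equal.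

-- ===== PORT A =====
-- A's while loop: state (large, i, sum2); returns the final (large, sum2).
def cost2Loop (a : List Int) (large i sum2 : Int) : Int × Int :=
  if 2 < large then
    if PySem.Int.mod i 2 = 0 then
      cost2Loop a large (i + 1) (sum2 + PySem.List.pyGetD a 0 0 + PySem.List.pyGetD a 1 0)
    else
      cost2Loop a (large - 2) (i + 1) (sum2 + PySem.List.pyGetD a large 0 + PySem.List.pyGetD a 1 0)
  else (large, sum2)
termination_by (2 * large + (if PySem.Int.mod i 2 = 0 then 1 else 0)).toNat
decreasing_by
  · simp only [PySem.Int.mod_eq_emod_of_pos (by norm_num : (0:Int) < 2)] at *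
    omega
  · simp only [PySem.Int.mod_eq_emod_of_pos (by norm_num : (0:Int) < 2)] at *
    omega

def cost2 (a : List Int) : Int :=
  let large : Int := (a.length : Int) - 1
  let r := cost2Loop a large 0 0
  if r.1 = 1 then r.2 + PySem.List.pyGetD a 1 0
  else if r.1 = 2 then r.2 + PySem.List.pyGetD a 0 0 + PySem.List.pyGetD a 1 0 + PySem.List.pyGetD a 2 0
  else r.2

-- ===== PORT B =====
-- Source B: comprehension over range(3 + n % 2, n, 2), then sum/len and the parity tail.
def cost2_alt (a : List Int) : Int :=
  let n : Int := (a.length : Int)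
  if n < 2 then 0
  else
    let strided : List Int :=
      (PySem.List.pyRange (3 + PySem.Int.mod n 2) n 2).map (fun i => PySem.List.pyGetD a i 0)
    let base : Int := strided.sum + (strided.length : Int) * (PySem.List.pyGetD a 0 0 + 2 * PySem.List.pyGetD a 1 0)
    if PySem.Int.mod n 2 = 0 then base + PySem.List.pyGetD a 1 0
    else base + PySem.List.pyGetD a 0 0 + PySem.List.pyGetD a 1 0 + PySem.List.pyGetD a 2 0

-- ===== PRECONDITION & SPEC =====
def Spec_cost2 (a : List Int) (out : Int) : Prop := out = cost2_alt a
instance (a : List Int) (out : Int) : Decidable (Spec_cost2 a out) := by unfold Spec_cost2; infer_instance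

-- ===== CLAIM (what is proved, stated in full; the proofs are below) =====
def Claim_equal_cost2 : Prop := ∀ (a : List Int), Dom_cost2 a → Spec_cost2 a (cost2 a)

-- ===== LEMMAS AND PROOFS =====

-- proof-only helper: the strided indices l, l-2, …, > 2, in ascending order
def dStride (l : Int) : List Int :=
  if 2 < l then dStride (l - 2) ++ [l] else []
termination_by l.toNat
decreasing_by omega

-- proof-only helper: the final value of A's `large`
def finL (l : Int) : Int :=
  if 2 < l then finL (l - 2) else l
termination_by l.toNat
decreasing_by omega

lemma finL_parity (l : Int) (h1 : 1 ≤ l) : finL l = if l % 2 = 1 then 1 else 2 := by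
  induction hn : l.toNat using Nat.strong_induction_on generalizing l with
  | _ n ih =>
    rw [finL]
    by_cases h : 2 < l
    · rw [if_pos h, ih (l-2).toNat (by omega) (l-2) (by omega) rfl]
      have : (l - 2) % 2 = l % 2 := by omega
      rw [this]
    · rw [if_neg h]
      interval_cases l <;> decide

lemma pyRange_two_nil (s b : Int) (h : b ≤ s) : PySem.List.pyRange s b 2 = [] := by
  rw [PySem.List.pyRange_of_pos _ _ (by norm_num : (0:Int) < 2)]
  simp [show ¬ s < b by omega]

lemma pyRange_two_snoc (s u : Int) (h1 : s ≤ u) (h2 : (2:Int) ∣ (u - s)) :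
    PySem.List.pyRange s (u + 1) 2 = PySem.List.pyRange s (u - 1) 2 ++ [u] := by
  obtain ⟨d, hd⟩ := h2
  rw [PySem.List.pyRange_of_pos _ _ (by norm_num : (0:Int) < 2),
      PySem.List.pyRange_of_pos _ _ (by norm_num : (0:Int) < 2)]
  rw [if_pos (by omega : s < u + 1)]
  have hc1 : ((u + 1 - s + 2 - 1) / 2).toNat = d.toNat + 1 := by omega
  by_cases h3 : s < u - 1
  · have hc2 : ((u - 1 - s + 2 - 1) / 2).toNat = d.toNat := by omega
    rw [if_pos h3, hc1, hc2, List.range_succ, List.map_append]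
    simp only [List.map_cons, List.map_nil]
    congr 2
    omega
  · have hd0 : d = 0 := by omega
    rw [if_neg h3, hc1]
    simp only [hd0, Int.toNat_zero, Nat.zero_add, List.range_one, List.map_cons, List.map_nil]
    congr 2
    omega

lemma pyRange_eq_dStride (l : Int) :
    PySem.List.pyRange (3 + PySem.Int.mod (l + 1) 2) (l + 1) 2 = dStride l := by
  induction hn : l.toNat using Nat.strong_induction_on generalizing l with
  | _ n ih =>
    have hmod : PySem.Int.mod (l + 1) 2 = (l + 1) % 2 :=
      PySem.Int.mod_eq_emod_of_pos (by norm_num)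
    rw [dStride, hmod]
    by_cases h : 2 < l
    · rw [if_pos h]
      have hsl : 3 + (l + 1) % 2 ≤ l := by omega
      have hdv : (2:Int) ∣ (l - (3 + (l + 1) % 2)) := by omega
      rw [show (l:Int) + 1 = l + 1 from rfl]
      have hsnoc := pyRange_two_snoc (3 + (l + 1) % 2) l hsl hdv
      rw [hsnoc]
      have hmod2 : (l - 2 + 1) % 2 = (l + 1) % 2 := by omega
      have := ih (l - 2).toNat (by omega) (l - 2) rfl
      rw [PySem.Int.mod_eq_emod_of_pos (by norm_num), hmod2,
          show l - 2 + 1 = l - 1 from by ring] at this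
      rw [this]
    · rw [if_neg h]
      exact pyRange_two_nil _ _ (by omega)


-- accumulator/tail characterisation of A's loop against the ascending strided index list
lemma loop_eq (a : List Int) : ∀ (n : Nat) (l i s2 : Int), l.toNat = n → PySem.Int.mod i 2 = 0 →
    cost2Loop a l i s2 =
      (finL l,
       s2 + ((dStride l).map (fun j => PySem.List.pyGetD a j 0)).sum +
         ((dStride l).length : Int) * (PySem.List.pyGetD a 0 0 + 2 * PySem.List.pyGetD a 1 0)) := by
  intro n
  induction n using Nat.strong_induction_on with
  | _ n ih =>
    intro l i s2 hn hi
    rw [finL, dStride]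
    by_cases h : 2 < l
    · have hi1 : PySem.Int.mod (i + 1) 2 ≠ 0 := by
        simp only [PySem.Int.mod_eq_emod_of_pos (by norm_num : (0:Int) < 2)] at *
        omega
      have hi2 : PySem.Int.mod (i + 1 + 1) 2 = 0 := by
        simp only [PySem.Int.mod_eq_emod_of_pos (by norm_num : (0:Int) < 2)] at *
        omega
      rw [cost2Loop]
      simp only [h, if_pos, hi]
      rw [cost2Loop]
      simp only [h, if_pos, hi1, reduceIte]
      rw [ih (l - 2).toNat (by omega) (l - 2) (i + 1 + 1) _ rfl hi2]
      simp only [List.map_append, List.sum_append, List.length_append,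
        List.map_cons, List.map_nil, List.sum_cons, List.sum_nil, List.length_cons,
        List.length_nil, Prod.mk.injEq]
      refine ⟨trivial, ?_⟩
      push_cast
      ring
    · rw [cost2Loop]
      simp [h]

-- ===== VERDICT (by name: the statement is the Claim_ definition above) =====
theorem cost2_spec : Claim_equal_cost2 := by
  intro a _
  unfold Spec_cost2
  simp only [cost2, cost2_alt]
  have hmodn : PySem.Int.mod (a.length : Int) 2 = (a.length : Int) % 2 :=
    PySem.Int.mod_eq_emod_of_pos (by norm_num)
  rw [loop_eq a ((a.length : Int) - 1).toNat _ 0 0 rfl (by decide)]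
  have hstr := pyRange_eq_dStride ((a.length : Int) - 1)
  rw [show (a.length : Int) - 1 + 1 = (a.length : Int) from by ring] at hstr
  by_cases hn : (a.length : Int) < 2
  · have hfin : finL ((a.length : Int) - 1) = (a.length : Int) - 1 := by
      rw [finL, if_neg (by omega)]
    have hds : dStride ((a.length : Int) - 1) = [] := by
      rw [dStride, if_neg (by omega)]
    rw [if_pos hn, hfin, hds]
    have h0 : (0:Nat) ≤ a.length := Nat.zero_le _
    split_ifs <;> simp_all <;> omega
  · rw [if_neg hn]
    rw [hstr]
    have hfin := finL_parity ((a.length : Int) - 1) (by omega)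
    rw [hfin, hmodn]
    by_cases hp : (a.length : Int) % 2 = 0
    · rw [if_pos hp, if_pos (by omega : ((a.length : Int) - 1) % 2 = 1)]
      norm_num
    · rw [if_neg hp, if_neg (by omega : ¬ ((a.length : Int) - 1) % 2 = 1)]
      norm_num
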